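-- pv_equiv track=rewrite | github.com/codephyle/interview | coding/arrays/positive_prefixes.py | maxPosPrefixes
-- ===== SOURCE A (Python) =====
-- def maxPosPrefixes(arr):
--
--     arr.sort(reverse=True)
--
--     psum, count = 0, 0
--     for n in arr:
--         psum += n
--         if psum > 0:
--             count += 1
--         else:
--             break
--
--     return count
-- ===== SOURCE B (Python) =====
-- # B: sort descending in place (same mutation as A), precompute the prefix-sum
-- # list, then BINARY SEARCH for the length of the positive-prefix run: after a
-- # descending sort, once a prefix sum is non-positive every longer prefix sum
-- # is too (the next element is <= the average of the ones summed so far), so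
-- # "prefix sum of length k is positive" is downward closed in k and the answer
-- # is the largest such k.
-- def maxPosPrefixes(arr):
--     arr.sort(reverse=True)
--     ps = []
--     s = 0
--     for n in arr:
--         s += n
--         ps.append(s)
--     lo, hi = 0, len(ps)
--     while lo < hi:
--         mid = (lo + hi + 1) // 2
--         if ps[mid - 1] > 0:
--             lo = mid
--         else:
--             hi = mid - 1
--     return lo
-- ===== Notes on version B (the rewrite author's own statement) =====
-- stated objective: alternative
-- what changed: B replaces A's fused accumulate-count-break loop by precomputing the prefix-sum list and binary searching for the length of the positive run (valid because after a descending sort positivity of the k-th prefix sum is downward closed in k).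
import Mathlib
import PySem

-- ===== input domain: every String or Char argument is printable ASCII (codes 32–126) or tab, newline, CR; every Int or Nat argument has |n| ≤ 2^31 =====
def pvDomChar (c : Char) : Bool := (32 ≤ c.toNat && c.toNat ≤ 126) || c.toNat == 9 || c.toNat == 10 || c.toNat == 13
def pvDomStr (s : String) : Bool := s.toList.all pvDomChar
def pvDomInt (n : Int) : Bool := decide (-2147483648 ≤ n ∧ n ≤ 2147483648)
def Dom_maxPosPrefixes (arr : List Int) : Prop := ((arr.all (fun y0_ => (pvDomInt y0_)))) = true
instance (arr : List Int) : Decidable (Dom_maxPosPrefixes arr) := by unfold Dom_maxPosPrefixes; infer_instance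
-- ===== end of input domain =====

-- B replaces A's fused accumulate/count/break loop by a prefix-sum list plus binary
-- search for the length of the positive-prefix run; both Pythons sort arr in place
-- (same mutation); the equivalence proved is about the return value.


-- ===== PORT A =====
-- the 'for n in arr: psum += n; if psum > 0: count += 1 else: break' loop
def aLoop : List Int → Int → Int → Int
  | [], _, count => count
  | n :: rest, psum, count =>
      if psum + n > 0 then aLoop rest (psum + n) (count + 1) else count

def maxPosPrefixes (arr : List Int) : Int :=
  aLoop (PySem.List.sorted arr (fun x => x) true) 0 0

-- ===== PORT B =====
-- the 'for n in arr: s += n; ps.append(s)' prefix-sum pass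
def accumAll : List Int → Int → List Int
  | [], _ => []
  | n :: rest, s => (s + n) :: accumAll rest (s + n)

-- the 'while lo < hi: mid = (lo+hi+1)//2; …' binary search (ps[mid-1] always in range)
def bsearch (ps : List Int) (lo hi : Nat) : Nat :=
  if lo < hi then
    let mid := (lo + hi + 1) / 2
    if 0 < ps.getD (mid - 1) 0 then bsearch ps mid hi else bsearch ps lo (mid - 1)
  else lo
termination_by hi - lo
decreasing_by all_goals omega

def maxPosPrefixes_alt (arr : List Int) : Int :=
  let ps := accumAll (PySem.List.sorted arr (fun x => x) true) 0
  (bsearch ps 0 ps.length : Int)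

-- ===== PRECONDITION & SPEC =====
def Spec_maxPosPrefixes (arr : List Int) (out : Int) : Prop := out = maxPosPrefixes_alt arr
instance (arr : List Int) (out : Int) : Decidable (Spec_maxPosPrefixes arr out) := by unfold Spec_maxPosPrefixes; infer_instance

-- ===== CLAIM (what is proved, stated in full; the proofs are below) =====
def Claim_equal_maxPosPrefixes : Prop := ∀ (arr : List Int), Dom_maxPosPrefixes arr → Spec_maxPosPrefixes arr (maxPosPrefixes arr)

-- ===== LEMMAS AND PROOFS =====

-- the length of the initial run of positive entries
def runLen : List Int → Nat
  | [] => 0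
  | s :: rest => if 0 < s then runLen rest + 1 else 0

-- A's break-loop counts exactly the initial positive run of the prefix-sum list
theorem aLoop_eq_runLen (xs : List Int) (psum count : Int) :
    aLoop xs psum count = count + (runLen (accumAll xs psum) : Int) := by
  induction xs generalizing psum count with
  | nil => simp [aLoop, accumAll, runLen]
  | cons n rest ih =>
      simp only [aLoop, accumAll, runLen]
      by_cases h : 0 < psum + n
      · rw [if_pos h, if_pos h, ih]
        push_cast; ring
      · rw [if_neg (by omega), if_neg h]; simp

-- downward closedness of positivity along a list
def Rlist (l : List Int) : Prop := ∀ k : Nat, 0 < l.getD (k + 1) 0 → 0 < l.getD k 0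

-- prefix sums of a descending list are downward closed in positivity
theorem accumAll_R (xs : List Int) (s : Int)
    (hsort : xs.Pairwise (fun a b => b ≤ a))
    (hH : ∀ x ∈ xs, 0 < x → 0 ≤ s) : Rlist (accumAll xs s) := by
  induction xs generalizing s with
  | nil => intro k h; simp [accumAll] at h
  | cons n rest ih =>
      rcases List.pairwise_cons.mp hsort with ⟨hd, htail⟩
      intro k h
      cases k with
      | zero =>
          -- 0 < (accumAll rest (s+n)).getD 0 → 0 < s + n
          cases rest with
          | nil => simp [accumAll] at h
          | cons m rest' =>
              simp only [accumAll, List.getD_cons_succ, List.getD_cons_zero] at h ⊢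
              by_cases hm : 0 < m
              · have hs : 0 ≤ s := hH m (by simp) hm
                have hnm : m ≤ n := hd m (by simp)
                omega
              · omega
      | succ k' =>
          simp only [accumAll, List.getD_cons_succ] at h ⊢
          exact ih (s + n) htail
            (fun x hx hxp => by
              have hxn : x ≤ n := hd x hx
              have hs : 0 ≤ s := hH x (List.mem_cons_of_mem _ hx) hxp
              omega) k' h

-- chain the one-step closedness down to any smaller index
theorem Rlist_chain (l : List Int) (hR : Rlist l) (i j : Nat) (hij : i ≤ j)
    (h : 0 < l.getD j 0) : 0 < l.getD i 0 := by
  induction j with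
  | zero =>
      have : i = 0 := by omega
      subst this; exact h
  | succ j' ih =>
      rcases Nat.lt_or_ge i (j' + 1) with hlt | hge
      · exact ih (by omega) (hR j' h)
      · have : i = j' + 1 := by omega
        exact this ▸ h

-- a "boundary" of l: all entries before it positive (via Rlist), entry at it non-positive
def Bnd (l : List Int) (b : Nat) : Prop :=
  b ≤ l.length ∧ (b = 0 ∨ 0 < l.getD (b - 1) 0) ∧ (b = l.length ∨ l.getD b 0 ≤ 0)

-- runLen is a boundary
theorem runLen_bnd (l : List Int) : Bnd l (runLen l) := by
  induction l with
  | nil => exact ⟨by simp [runLen], Or.inl rfl, Or.inl rfl⟩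
  | cons s rest ih =>
      rcases ih with ⟨h1, h2, h3⟩
      by_cases hs : 0 < s
      · refine ⟨by simp [runLen, hs]; omega, ?_, ?_⟩
        · right
          simp only [runLen, if_pos hs]
          cases hrl : runLen rest with
          | zero => simpa using hs
          | succ k =>
              rcases h2 with h2 | h2
              · omega
              · rw [hrl] at h2
                simpa [hrl] using h2
        · simp only [runLen, if_pos hs, List.length_cons, List.getD_cons_succ]
          rcases h3 with h3 | h3
          · left; omega
          · right; exact h3
      · exact ⟨by simp [runLen, hs], Or.inl (by simp [runLen, hs]),
          Or.inr (by simpa [runLen, hs] using (by omega : s ≤ 0))⟩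

-- boundaries are unique once positivity is downward closed
theorem bnd_unique (l : List Int) (hR : Rlist l) (b1 b2 : Nat)
    (h1 : Bnd l b1) (h2 : Bnd l b2) : b1 = b2 := by
  rcases h1 with ⟨h1l, h1p, h1s⟩
  rcases h2 with ⟨h2l, h2p, h2s⟩
  by_contra hne
  -- wlog via two symmetric cases
  rcases Nat.lt_or_ge b1 b2 with hlt | hge
  · have hp : 0 < l.getD (b2 - 1) 0 := by
      rcases h2p with h | h
      · omega
      · exact h
    have hpos : 0 < l.getD b1 0 := Rlist_chain l hR b1 (b2 - 1) (by omega) hp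
    rcases h1s with h | h
    · omega
    · omega
  · have hlt : b2 < b1 := by omega
    have hp : 0 < l.getD (b1 - 1) 0 := by
      rcases h1p with h | h
      · omega
      · exact h
    have hpos : 0 < l.getD b2 0 := Rlist_chain l hR b2 (b1 - 1) (by omega) hp
    rcases h2s with h | h
    · omega
    · omega

-- the binary search returns a boundary, given the loop invariant
theorem bsearch_bnd (l : List Int) (lo hi : Nat) (hhi : hi ≤ l.length) (hlo : lo ≤ hi)
    (hplo : lo = 0 ∨ 0 < l.getD (lo - 1) 0) (hstop : hi = l.length ∨ l.getD hi 0 ≤ 0) :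
    Bnd l (bsearch l lo hi) := by
  induction hfuel : hi - lo using Nat.strong_induction_on generalizing lo hi with
  | _ d ih =>
      rw [bsearch]
      by_cases h : lo < hi
      · rw [if_pos h]
        set mid := (lo + hi + 1) / 2 with hmid
        have hm1 : lo < mid := by omega
        have hm2 : mid ≤ hi := by omega
        by_cases hp : 0 < l.getD (mid - 1) 0
        · rw [if_pos hp]
          exact ih (hi - mid) (by omega) mid hi hhi hm2 (Or.inr hp) hstop rfl
        · rw [if_neg hp]
          exact ih (mid - 1 - lo) (by omega) lo (mid - 1) (by omega) (by omega) hplo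
            (Or.inr (by omega)) rfl
      · rw [if_neg h]
        have : lo = hi := by omega
        subst this
        exact ⟨hhi, hplo, hstop⟩

-- ===== VERDICT (by name: the statement is the Claim_ definition above) =====
theorem maxPosPrefixes_spec : Claim_equal_maxPosPrefixes := by
  intro arr _
  unfold Spec_maxPosPrefixes maxPosPrefixes maxPosPrefixes_alt
  set xs := PySem.List.sorted arr (fun x => x) true with hxs
  set l := accumAll xs 0 with hl
  have hR : Rlist l := accumAll_R xs 0 (PySem.List.sorted_pairwise_rev arr (fun x => x))
    (fun _ _ _ => le_rfl)
  have hb : bsearch l 0 l.length = runLen l :=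
    bnd_unique l hR _ _ (bsearch_bnd l 0 l.length le_rfl (Nat.zero_le _) (Or.inl rfl) (Or.inl rfl))
      (runLen_bnd l)
  rw [aLoop_eq_runLen]
  show (0 : Int) + (runLen l : Int) = ((bsearch l 0 l.length : Nat) : Int)
  rw [hb]
  simp
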